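-- pv_equiv track=rewrite | github.com/LeanneNortje/low-resource_VPKL | Yoruba_few-shot_keyword_localisation/kayode_results.py | eval_localisation_accuracy
-- ===== SOURCE A (Python) =====
-- def eval_localisation_accuracy(hyp_loc, gt_loc):
--     score = 0
--     total = 0
--
--     for gt_start_end_frame, gt_token in gt_loc:
--         if gt_token not in [hyp_token for _, hyp_token in hyp_loc]:
--             total += 1
--
--         if gt_token in [hyp_token for _, hyp_token in hyp_loc]:
--             total += 1
--
--         for hyp_frame, hyp_token in hyp_loc:
--             if hyp_token == gt_token and (gt_start_end_frame[0] <= hyp_frame < gt_start_end_frame[1] or gt_start_end_frame[0] < hyp_frame <= gt_start_end_frame[1]):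
--                 score += 1
--
--     return score, total
-- ===== SOURCE B (Python) =====
-- def eval_localisation_accuracy(hyp_loc, gt_loc):
--     # Group hyp frames by token once, so each gt entry only scans its own
--     # token's frames instead of the whole hyp list (three times) per gt entry.
--     index = {}
--     for frame, token in hyp_loc:
--         index[token] = index.get(token, []) + [frame]
--     score = 0
--     for (start, end), token in gt_loc:
--         if start < end:
--             for f in index.get(token, []):
--                 if start <= f <= end:
--                     score += 1
--     return score, len(gt_loc)
-- ===== Notes on version B (the rewrite author's own statement) =====
-- stated objective: faster
-- what changed: B builds a token->frames index once and takes total = len(gt_loc), replacing A's two full membership scans plus full inner scan per gt entry with a single lookup of the matching token's frames, using the simplified interval test start<end and start<=f<=end.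
import Mathlib
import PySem

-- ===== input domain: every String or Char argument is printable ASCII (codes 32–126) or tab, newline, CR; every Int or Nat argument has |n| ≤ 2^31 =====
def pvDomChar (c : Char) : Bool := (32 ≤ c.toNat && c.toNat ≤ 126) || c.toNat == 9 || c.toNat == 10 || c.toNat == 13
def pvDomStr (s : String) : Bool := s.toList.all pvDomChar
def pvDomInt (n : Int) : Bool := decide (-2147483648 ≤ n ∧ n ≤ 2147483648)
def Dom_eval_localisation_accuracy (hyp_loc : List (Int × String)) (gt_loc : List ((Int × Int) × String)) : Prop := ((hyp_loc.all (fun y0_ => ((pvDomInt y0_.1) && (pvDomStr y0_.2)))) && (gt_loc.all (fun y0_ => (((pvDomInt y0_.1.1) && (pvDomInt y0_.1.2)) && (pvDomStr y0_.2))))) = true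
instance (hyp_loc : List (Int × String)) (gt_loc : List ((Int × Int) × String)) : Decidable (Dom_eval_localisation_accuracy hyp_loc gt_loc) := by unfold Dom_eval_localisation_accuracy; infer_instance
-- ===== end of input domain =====

-- B groups hyp frames by token once and uses total = len(gt_loc); objective: faster by removing A's repeated full scans of hyp_loc per gt entry.

-- ===== PORT A =====
def eval_localisation_accuracy (hyp_loc : List (Int × String)) (gt_loc : List ((Int × Int) × String)) : Int × Int :=
  let r := gt_loc.foldl (fun (st : Int × Int) g =>
    let total := if g.2 ∈ hyp_loc.map Prod.snd then st.2 else st.2 + 1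
    let total := if g.2 ∈ hyp_loc.map Prod.snd then total + 1 else total
    let score := hyp_loc.foldl (fun (s : Int) h =>
      if h.2 = g.2 ∧ ((g.1.1 ≤ h.1 ∧ h.1 < g.1.2) ∨ (g.1.1 < h.1 ∧ h.1 ≤ g.1.2)) then s + 1 else s) st.1
    (score, total)) (0, 0)
  r

-- ===== PORT B =====
def eval_localisation_accuracy_alt (hyp_loc : List (Int × String)) (gt_loc : List ((Int × Int) × String)) : Int × Int :=
  let index : PySem.Dict String (List Int) :=
    hyp_loc.foldl (fun d p => d.insert p.2 (d.getD p.2 [] ++ [p.1])) PySem.Dict.empty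
  let score := gt_loc.foldl (fun (s : Int) g =>
    if g.1.1 < g.1.2 then
      (index.getD g.2 []).foldl (fun (s : Int) f => if g.1.1 ≤ f ∧ f ≤ g.1.2 then s + 1 else s) s
    else s) 0
  (score, (gt_loc.length : Int))

-- ===== PRECONDITION & SPEC =====
def Spec_eval_localisation_accuracy (hyp_loc : List (Int × String)) (gt_loc : List ((Int × Int) × String)) (out : Int × Int) : Prop := out = eval_localisation_accuracy_alt hyp_loc gt_loc
instance (hyp_loc : List (Int × String)) (gt_loc : List ((Int × Int) × String)) (out : Int × Int) : Decidable (Spec_eval_localisation_accuracy hyp_loc gt_loc out) := by unfold Spec_eval_localisation_accuracy; infer_instance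

-- ===== CLAIM (what is proved, stated in full; the proofs are below) =====
def Claim_equal_eval_localisation_accuracy : Prop := ∀ (hyp_loc : List (Int × String)) (gt_loc : List ((Int × Int) × String)), Dom_eval_localisation_accuracy hyp_loc gt_loc → Spec_eval_localisation_accuracy hyp_loc gt_loc (eval_localisation_accuracy hyp_loc gt_loc)

-- ===== LEMMAS AND PROOFS =====

-- the grouping loop builds exactly the frames of hyp entries with the given token, in order
theorem index_getD (hyp : List (Int × String)) (d : PySem.Dict String (List Int)) (tok : String) :
    (hyp.foldl (fun d p => d.insert p.2 (d.getD p.2 [] ++ [p.1])) d).getD tok []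
      = d.getD tok [] ++ (hyp.filter (fun p => p.2 == tok)).map Prod.fst := by
  induction hyp generalizing d with
  | nil => simp
  | cons h t ih =>
    simp only [List.foldl_cons, ih, List.filter_cons]
    by_cases he : h.2 = tok
    · simp [he]
    · have : (h.2 == tok) = false := by simp [he]
      simp [this, PySem.Dict.getD_insert, Ne.symm he]

-- per-gt-entry score contribution of A's inner loop
theorem innerA (hyp : List (Int × String)) (g : (Int × Int) × String) (s : Int) :
    hyp.foldl (fun (s : Int) h =>
      if h.2 = g.2 ∧ ((g.1.1 ≤ h.1 ∧ h.1 < g.1.2) ∨ (g.1.1 < h.1 ∧ h.1 ≤ g.1.2)) then s + 1 else s) s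
    = s + (hyp.countP (fun h => decide (h.2 = g.2 ∧ ((g.1.1 ≤ h.1 ∧ h.1 < g.1.2) ∨ (g.1.1 < h.1 ∧ h.1 ≤ g.1.2)))) : Int) := by
  exact PySem.List.foldl_ite_add_one _ _ _

-- per-gt-entry score contribution of B's inner loop equals A's
theorem inner_eq (hyp : List (Int × String)) (g : (Int × Int) × String) (s : Int) :
    (if g.1.1 < g.1.2 then
      (((hyp.filter (fun p => p.2 == g.2)).map Prod.fst).foldl
        (fun (s : Int) f => if g.1.1 ≤ f ∧ f ≤ g.1.2 then s + 1 else s) s)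
     else s)
    = s + (hyp.countP (fun h => decide (h.2 = g.2 ∧ ((g.1.1 ≤ h.1 ∧ h.1 < g.1.2) ∨ (g.1.1 < h.1 ∧ h.1 ≤ g.1.2)))) : Int) := by
  by_cases hlt : g.1.1 < g.1.2
  · simp only [hlt, if_true]
    rw [PySem.List.foldl_ite_add_one]
    congr 2
    rw [List.countP_map, List.countP_filter]
    apply List.countP_congr
    intro p _
    simp only [Function.comp]
    by_cases he : p.2 = g.2
    · simp [he]; omega
    · simp [he]
  · simp only [hlt, if_false]
    have h0 : hyp.countP (fun h => decide (h.2 = g.2 ∧ ((g.1.1 ≤ h.1 ∧ h.1 < g.1.2) ∨ (g.1.1 < h.1 ∧ h.1 ≤ g.1.2)))) = 0 := by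
      rw [List.countP_eq_zero]
      intro p _ hp
      rw [decide_eq_true_eq] at hp
      obtain ⟨-, h⟩ := hp
      omega
    rw [h0]
    simp

-- A's total is incremented exactly once per gt entry
theorem A_state (hyp : List (Int × String)) (gt : List ((Int × Int) × String)) (s t : Int) :
    gt.foldl (fun (st : Int × Int) g =>
      let total := if g.2 ∈ hyp.map Prod.snd then st.2 else st.2 + 1
      let total := if g.2 ∈ hyp.map Prod.snd then total + 1 else total
      let score := hyp.foldl (fun (s : Int) h =>
        if h.2 = g.2 ∧ ((g.1.1 ≤ h.1 ∧ h.1 < g.1.2) ∨ (g.1.1 < h.1 ∧ h.1 ≤ g.1.2)) then s + 1 else s) st.1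
      (score, total)) (s, t)
    = (s + ((gt.map (fun g => (hyp.countP (fun h => decide (h.2 = g.2 ∧ ((g.1.1 ≤ h.1 ∧ h.1 < g.1.2) ∨ (g.1.1 < h.1 ∧ h.1 ≤ g.1.2)))) : Int))).sum),
       t + gt.length) := by
  induction gt generalizing s t with
  | nil => simp
  | cons g tl ih =>
    simp only [List.foldl_cons, List.map_cons, List.sum_cons, List.length_cons]
    rw [innerA]
    by_cases hm : g.2 ∈ hyp.map Prod.snd
    · simp only [hm, if_true, ih]
      simp only [Prod.mk.injEq]
      exact ⟨by ring, by push_cast; ring⟩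
    · simp only [hm, if_false, ih]
      simp only [Prod.mk.injEq]
      exact ⟨by ring, by push_cast; ring⟩

-- B's score loop sums the same per-entry contributions
theorem B_state (hyp : List (Int × String)) (gt : List ((Int × Int) × String)) (s : Int) :
    gt.foldl (fun (s : Int) g =>
      if g.1.1 < g.1.2 then
        (((hyp.foldl (fun d p => d.insert p.2 (d.getD p.2 [] ++ [p.1])) PySem.Dict.empty).getD g.2 []).foldl
          (fun (s : Int) f => if g.1.1 ≤ f ∧ f ≤ g.1.2 then s + 1 else s) s)
      else s) s
    = s + ((gt.map (fun g => (hyp.countP (fun h => decide (h.2 = g.2 ∧ ((g.1.1 ≤ h.1 ∧ h.1 < g.1.2) ∨ (g.1.1 < h.1 ∧ h.1 ≤ g.1.2)))) : Int))).sum) := by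
  induction gt generalizing s with
  | nil => simp
  | cons g tl ih =>
    simp only [List.foldl_cons, List.map_cons, List.sum_cons]
    rw [ih]
    have h1 := index_getD hyp PySem.Dict.empty g.2
    rw [PySem.Dict.getD_empty] at h1
    simp only [List.nil_append] at h1
    rw [h1, inner_eq]
    ring

-- ===== VERDICT (by name: the statement is the Claim_ definition above) =====
theorem eval_localisation_accuracy_spec : Claim_equal_eval_localisation_accuracy := by
  intro hyp gt _
  unfold Spec_eval_localisation_accuracy eval_localisation_accuracy eval_localisation_accuracy_alt
  simp only []
  rw [A_state, B_state]
  simp
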